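-- pv_equiv track=rewrite | github.com/sitijuhisaa/Problem-solving-test | 1.py | solve_A000124
-- ===== SOURCE A (Python) =====
-- def A000124(n):
--     if n < 1:
--         raise ValueError("n harus lebih besar dari atau sama dengan 1")
--     return n ** 2
--
-- def solve_A000124(input_number):
--     if input_number < 1:
--         raise ValueError("Input harus lebih besar dari atau sama dengan 1")
--
--     sequence = []
--     current_number = 0
--
--     for i in range(1, input_number + 1):
--         current_number += i
--         sequence.append(A000124(current_number))
--
--     return sequence
-- ===== SOURCE B (Python) =====
-- def solve_A000124(input_number):
--     if input_number < 1:
--         raise ValueError("Input harus lebih besar dari atau sama dengan 1")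
--     return [(i * (i + 1) // 2) ** 2 for i in range(1, input_number + 1)]
-- ===== Notes on version B (the rewrite author's own statement) =====
-- stated objective: simpler
-- what changed: Replaces the running-sum accumulator and helper call with a single comprehension computing each element independently by the closed form (i*(i+1)//2)**2.
import Mathlib
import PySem

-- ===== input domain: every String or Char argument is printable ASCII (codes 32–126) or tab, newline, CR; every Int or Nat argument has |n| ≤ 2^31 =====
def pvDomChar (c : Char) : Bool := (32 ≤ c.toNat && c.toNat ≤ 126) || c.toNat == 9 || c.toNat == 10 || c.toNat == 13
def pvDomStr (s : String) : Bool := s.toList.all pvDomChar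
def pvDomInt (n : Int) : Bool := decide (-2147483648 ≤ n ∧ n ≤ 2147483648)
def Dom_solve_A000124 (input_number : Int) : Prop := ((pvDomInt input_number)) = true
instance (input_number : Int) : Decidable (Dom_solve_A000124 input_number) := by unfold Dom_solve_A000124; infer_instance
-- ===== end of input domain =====

-- B replaces A's running-sum accumulator with a comprehension using the closed form (i*(i+1)//2)**2; objective: simpler.


-- ===== PORT A =====
-- helper A000124: 'if n < 1: raise' is unreachable from solve_A000124 (every argument is a
-- triangular number T_i with i ≥ 1, hence ≥ 1); the raise branch is modelled by 0 and never taken.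
def A000124 (n : Int) : Int := if n < 1 then 0 else n ^ 2

def solve_A000124 (input_number : Int) : List Int :=
  ((PySem.List.pyRange 1 (input_number + 1) 1).foldl
    (fun (st : Int × List Int) i =>
      let current := st.1 + i
      (current, st.2 ++ [A000124 current]))
    (0, [])).2

-- ===== PORT B =====
def solve_A000124_alt (input_number : Int) : List Int :=
  (PySem.List.pyRange 1 (input_number + 1) 1).map
    (fun i => (PySem.Int.floordiv (i * (i + 1)) 2) ^ 2)

-- ===== PRECONDITION & SPEC =====
-- A raises ValueError on input_number < 1; those inputs are excluded.
def Pre_solve_A000124 (input_number : Int) : Prop := 1 ≤ input_number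
instance (input_number : Int) : Decidable (Pre_solve_A000124 input_number) := by unfold Pre_solve_A000124; infer_instance
def pvWitness_solve_A000124 : Int := (5)

def Spec_solve_A000124 (input_number : Int) (out : List Int) : Prop := out = solve_A000124_alt input_number
instance (input_number : Int) (out : List Int) : Decidable (Spec_solve_A000124 input_number out) := by unfold Spec_solve_A000124; infer_instance

-- ===== CLAIM (what is proved, stated in full; the proofs are below) =====
def Claim_equal_solve_A000124 : Prop := ∀ (input_number : Int), Dom_solve_A000124 input_number → Pre_solve_A000124 input_number → Spec_solve_A000124 input_number (solve_A000124 input_number)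

-- ===== LEMMAS AND PROOFS =====

-- the closed form for one element
def pvG (i : Int) : Int := (PySem.Int.floordiv (i * (i + 1)) 2) ^ 2

-- over the first m loop iterations the fold state is (T_m, map of the closed form)
theorem pv_fold_inv (m : Nat) :
    ((List.range m).map (fun k : Nat => (1 : Int) + (k : Int))).foldl
      (fun (st : Int × List Int) i =>
        let current := st.1 + i
        (current, st.2 ++ [A000124 current]))
      (0, [])
    = ((m * (m + 1) / 2 : Int),
       ((List.range m).map (fun k : Nat => (1 : Int) + (k : Int))).map pvG) := by
  induction m with
  | zero => simp
  | succ m ih =>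
    rw [List.range_succ, List.map_append, List.foldl_append, ih]
    simp only [List.map_cons, List.map_nil, List.foldl_cons, List.foldl_nil, List.map_append]
    obtain ⟨c, hc⟩ : (2 : Int) ∣ (m : Int) * ((m : Int) + 1) :=
      (Int.even_mul_succ_self (m : Int)).two_dvd
    have hq : ((m : Int) + 1) * (((m : Int) + 1) + 1)
        = (m : Int) * ((m : Int) + 1) + 2 * ((m : Int) + 1) := by ring
    have hT : ((m : Int) * ((m : Int) + 1) / 2) + (1 + (m : Int))
        = ((m : Int) + 1) * (((m : Int) + 1) + 1) / 2 := by rw [hq, hc]; omega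
    have hpos : ¬ (((m : Int) + 1) * (((m : Int) + 1) + 1) / 2 < 1) := by
      have h3 : (2 : Int) ≤ ((m : Int) + 1) * (((m : Int) + 1) + 1) := by
        nlinarith [Int.natCast_nonneg m]
      omega
    have hval : A000124 (((m : Int) * ((m : Int) + 1) / 2) + (1 + (m : Int)))
        = pvG (1 + (m : Int)) := by
      rw [hT]
      simp only [pvG, A000124, hpos, if_false]
      rw [PySem.Int.floordiv_eq_ediv_of_pos (by norm_num)]
      have harg : ((1 : Int) + (m : Int)) * ((1 : Int) + (m : Int) + 1)
          = ((m : Int) + 1) * (((m : Int) + 1) + 1) := by ring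
      rw [harg]
    rw [hval, Prod.mk.injEq]
    refine ⟨?_, rfl⟩
    have hcast : ((m + 1 : Nat) : Int) = (m : Int) + 1 := by push_cast; ring
    rw [hcast]
    exact hT

-- ===== VERDICT (by name: the statement is the Claim_ definition above) =====
theorem solve_A000124_spec : Claim_equal_solve_A000124 := by
  intro n _ _
  show solve_A000124 n = solve_A000124_alt n
  unfold solve_A000124 solve_A000124_alt
  rw [PySem.List.pyRange_one]
  have : (n + 1 - 1 : Int) = n := by omega
  rw [this, pv_fold_inv]
  rfl
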